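-- pv_equiv track=rewrite | github.com/CescMateu/drug-interactions | context_features.py | countModalVerbsBetweenEntities
-- ===== SOURCE A (Python) =====
-- def countModalVerbsBetweenEntities(sentence_tokenized, ent1, ent2):
-- 	'''
-- 	Description:
-- 	Returns an integer indicating the number of modal verbs in the sentence between ent1 and ent2
--
-- 	>>> countModalVerbsBetweenEntities(['I', 'think', 'you', 'should', 'eat', 'your', 'ice-cream'], 'you', 'ice-cream')
-- 	1
-- 	>>> countModalVerbsBetweenEntities(['I', 'think', 'you', 'should', 'eat', 'your', 'ice-cream'], 'your', 'ice-cream')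
-- 	0
-- 	'''
-- 	# Initializate a list with the most common modal verbs
-- 	modal_verbs = ['should', 'must', 'can', 'could', 'may', 'might', 'will', 'would', 'shall']
--
-- 	# Get the range of the sentence in which to iterate
-- 	if sentence_tokenized.index(ent1) <	sentence_tokenized.index(ent2):
-- 	    min_idx = sentence_tokenized.index(ent1)
-- 	    max_idx = sentence_tokenized.index(ent2)
-- 	else:
-- 	    min_idx = sentence_tokenized.index(ent2)
-- 	    max_idx = sentence_tokenized.index(ent1)
--
-- 	# Iterate over the list to retrieve the result
-- 	modal_verbs_count = 0
-- 	for modal_verb in modal_verbs: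
-- 		if modal_verb in sentence_tokenized[min_idx:max_idx+1]:
-- 			modal_verbs_count += 1
--
-- 	return(modal_verbs_count)
-- ===== SOURCE B (Python) =====
-- def countModalVerbsBetweenEntities(sentence_tokenized, ent1, ent2):
--     i = sentence_tokenized.index(ent1)
--     j = sentence_tokenized.index(ent2)
--     if i < j:
--         lo, hi = i, j
--     else:
--         lo, hi = j, i
--     modals = ('should', 'must', 'can', 'could', 'may', 'might', 'will', 'would', 'shall')
--     seen = []
--     for tok in sentence_tokenized[lo:hi + 1]:
--         if tok in modals and tok not in seen:
--             seen.append(tok)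
--     return len(seen)
-- ===== Notes on version B (the rewrite author's own statement) =====
-- stated objective: alternative
-- what changed: Inverts the traversal: instead of looping over the nine modal verbs and scanning the window slice for each, B makes a single pass over the tokens of the inclusive window, accumulating each modal the first time it is seen, and returns the length of that accumulator.
import Mathlib
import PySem

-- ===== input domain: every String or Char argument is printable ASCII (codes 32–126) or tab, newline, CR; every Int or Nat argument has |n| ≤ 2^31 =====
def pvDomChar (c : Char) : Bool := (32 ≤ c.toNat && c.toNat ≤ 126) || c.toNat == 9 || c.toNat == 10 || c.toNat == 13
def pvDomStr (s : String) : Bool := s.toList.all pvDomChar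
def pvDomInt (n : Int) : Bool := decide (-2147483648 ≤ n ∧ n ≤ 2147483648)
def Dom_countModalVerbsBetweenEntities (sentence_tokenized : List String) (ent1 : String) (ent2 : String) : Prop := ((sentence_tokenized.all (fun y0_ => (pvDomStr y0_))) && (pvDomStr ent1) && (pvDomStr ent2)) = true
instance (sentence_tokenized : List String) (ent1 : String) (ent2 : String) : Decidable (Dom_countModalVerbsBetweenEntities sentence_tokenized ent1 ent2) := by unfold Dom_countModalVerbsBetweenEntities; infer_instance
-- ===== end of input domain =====

-- B inverts the traversal: one pass over the inclusive window collecting each modal the first time it is seen, instead of A's nine membership scans of the slice.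
-- ===== PORT A =====
def pvModalVerbs : List String :=
  ["should", "must", "can", "could", "may", "might", "will", "would", "shall"]

def countModalVerbsBetweenEntities (sentence_tokenized : List String) (ent1 : String) (ent2 : String) : Int :=
  match PySem.List.index? sentence_tokenized ent1, PySem.List.index? sentence_tokenized ent2 with
  | some i1, some i2 =>
    let min_idx : Nat := if i1 < i2 then i1 else i2
    let max_idx : Nat := if i1 < i2 then i2 else i1
    pvModalVerbs.foldl
      (fun acc m =>
        if m ∈ PySem.List.slice sentence_tokenized (some (min_idx : Int)) (some ((max_idx : Int) + 1))
        then acc + 1 else acc) (0 : Int)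
  | _, _ => 0   -- sentence_tokenized.index raises ValueError: excluded by Pre_

-- ===== PORT B =====
def countModalVerbsBetweenEntities_alt (sentence_tokenized : List String) (ent1 : String) (ent2 : String) : Int :=
  -- .index raises ValueError when an entity is absent: excluded by Pre_ (the 0 branches are unreachable there)
  (PySem.List.index? sentence_tokenized ent1).elim 0 fun i =>
    (PySem.List.index? sentence_tokenized ent2).elim 0 fun j =>
      let lo := if i < j then i else j
      let hi := if i < j then j else i
      let seen :=
        (PySem.List.slice sentence_tokenized (some (lo : Int)) (some ((hi : Int) + 1))).foldl
          (fun seen tok => if tok ∈ pvModalVerbs ∧ tok ∉ seen then seen ++ [tok] else seen)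
          ([] : List String)
      (seen.length : Int)

-- ===== PRECONDITION & SPEC =====
-- Pre_: both entities occur in the token list; otherwise list.index raises ValueError in A (and in B).
def Pre_countModalVerbsBetweenEntities (sentence_tokenized : List String) (ent1 : String) (ent2 : String) : Prop :=
  ent1 ∈ sentence_tokenized ∧ ent2 ∈ sentence_tokenized
instance (sentence_tokenized : List String) (ent1 : String) (ent2 : String) : Decidable (Pre_countModalVerbsBetweenEntities sentence_tokenized ent1 ent2) := by unfold Pre_countModalVerbsBetweenEntities; infer_instance

def pvWitness_countModalVerbsBetweenEntities : List String × String × String :=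
  (["I", "think", "you", "should", "eat", "your", "ice-cream"], "you", "ice-cream")

def Spec_countModalVerbsBetweenEntities (sentence_tokenized : List String) (ent1 : String) (ent2 : String) (out : Int) : Prop := out = countModalVerbsBetweenEntities_alt sentence_tokenized ent1 ent2
instance (sentence_tokenized : List String) (ent1 : String) (ent2 : String) (out : Int) : Decidable (Spec_countModalVerbsBetweenEntities sentence_tokenized ent1 ent2 out) := by unfold Spec_countModalVerbsBetweenEntities; infer_instance

-- ===== CLAIM (what is proved, stated in full; the proofs are below) =====
def Claim_equal_countModalVerbsBetweenEntities : Prop := ∀ (sentence_tokenized : List String) (ent1 : String) (ent2 : String), Dom_countModalVerbsBetweenEntities sentence_tokenized ent1 ent2 → Pre_countModalVerbsBetweenEntities sentence_tokenized ent1 ent2 → Spec_countModalVerbsBetweenEntities sentence_tokenized ent1 ent2 (countModalVerbsBetweenEntities sentence_tokenized ent1 ent2)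

-- ===== LEMMAS AND PROOFS =====
-- invariant of B's seen-accumulator loop: the accumulator stays duplicate-free and
-- collects exactly the modals occurring in the prefix consumed so far
lemma pv_seen_fold_inv (window : List String) :
    ∀ acc : List String, acc.Nodup →
      (window.foldl (fun seen tok => if tok ∈ pvModalVerbs ∧ tok ∉ seen then seen ++ [tok] else seen) acc).Nodup
      ∧ ∀ x, x ∈ window.foldl (fun seen tok => if tok ∈ pvModalVerbs ∧ tok ∉ seen then seen ++ [tok] else seen) acc
          ↔ x ∈ acc ∨ (x ∈ window ∧ x ∈ pvModalVerbs) := by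
  induction window with
  | nil => intro acc h; simpa using h
  | cons t rest ih =>
    intro acc hnd
    simp only [List.foldl_cons]
    by_cases hc : t ∈ pvModalVerbs ∧ t ∉ acc
    · rw [if_pos hc]
      obtain ⟨hnd', hmem⟩ := ih (acc ++ [t])
        (by refine List.Nodup.append hnd (List.nodup_singleton t) ?_
            intro a ha hb
            simp only [List.mem_singleton] at hb
            exact hc.2 (hb ▸ ha))
      refine ⟨hnd', fun x => ?_⟩
      rw [hmem x]
      simp only [List.mem_append, List.mem_cons, List.not_mem_nil, or_false]
      rcases eq_or_ne x t with rfl | hne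
      · have := hc.1; tauto
      · tauto
    · rw [if_neg hc]
      obtain ⟨hnd', hmem⟩ := ih acc hnd
      refine ⟨hnd', fun x => ?_⟩
      rw [hmem x]
      simp only [List.mem_cons]
      rcases eq_or_ne x t with rfl | hne
      · rcases Classical.em (x ∈ acc) with h' | h'
        · tauto
        · constructor
          · tauto
          · rintro (h | ⟨_, hm⟩)
            · exact Or.inl h
            · exact absurd ⟨hm, h'⟩ hc
      · tauto

-- the two counting shapes agree for any window
lemma pv_count_eq (window : List String) :
    pvModalVerbs.foldl (fun acc m => if m ∈ window then acc + 1 else acc) (0 : Int)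
      = ((window.foldl (fun seen tok => if tok ∈ pvModalVerbs ∧ tok ∉ seen then seen ++ [tok] else seen)
            ([] : List String)).length : Int) := by
  rw [PySem.List.foldl_ite_add_one]
  obtain ⟨hnd, hmem⟩ := pv_seen_fold_inv window [] List.nodup_nil
  have hperm : (pvModalVerbs.filter (fun m => decide (m ∈ window))).Perm
      (window.foldl (fun seen tok => if tok ∈ pvModalVerbs ∧ tok ∉ seen then seen ++ [tok] else seen) []) := by
    rw [List.perm_ext_iff_of_nodup (List.Nodup.filter _ (by decide)) hnd]
    intro x
    rw [hmem x]
    simp only [List.mem_filter, decide_eq_true_eq, List.not_mem_nil, false_or]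
    have : pvModalVerbs = pvModalVerbs := rfl
    rw [this]
    tauto
  rw [List.countP_eq_length_filter]
  simp [hperm.length_eq]

-- ===== VERDICT (by name: the statement is the Claim_ definition above) =====
theorem countModalVerbsBetweenEntities_spec : Claim_equal_countModalVerbsBetweenEntities := by
  intro xs e1 e2 _ ⟨h1, h2⟩
  unfold Spec_countModalVerbsBetweenEntities
  obtain ⟨i, hi⟩ := Option.isSome_iff_exists.mp ((PySem.List.index?_isSome_iff xs e1).mpr h1)
  obtain ⟨j, hj⟩ := Option.isSome_iff_exists.mp ((PySem.List.index?_isSome_iff xs e2).mpr h2)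
  unfold countModalVerbsBetweenEntities countModalVerbsBetweenEntities_alt
  rw [hi, hj]
  simp only [Option.elim]
  exact pv_count_eq _
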